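-- pv_equiv track=rewrite | github.com/wx22222/dashABR | python/analysis/compare_abr_time_norm_three.py | _count_edges
-- ===== SOURCE A (Python) =====
-- def _count_edges(bools):
--     prev = False
--     c = 0
--     for v in bools:
--         v2 = bool(v)
--         if v2 and not prev:
--             c += 1
--         prev = v2
--     return c
-- ===== SOURCE B (Python) =====
-- def _count_edges(bools):
--     # Arithmetic identity: each maximal run of k consecutive truthy values
--     # contributes k trues and k-1 adjacent True-True pairs, hence exactly
--     # one rising edge.  So edges = #trues - #(adjacent True,True pairs).
--     bs = [bool(v) for v in bools]
--     return sum(bs) - sum(1 for a, b in zip(bs, bs[1:]) if a and b)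
-- ===== Notes on version B (the rewrite author's own statement) =====
-- stated objective: alternative
-- what changed: Replaces the stateful prev-flag transition loop with the arithmetic identity edges = count(True) - count(adjacent True,True pairs), computed from two stateless counts (sum and a zip with the shifted list).
import Mathlib
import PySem

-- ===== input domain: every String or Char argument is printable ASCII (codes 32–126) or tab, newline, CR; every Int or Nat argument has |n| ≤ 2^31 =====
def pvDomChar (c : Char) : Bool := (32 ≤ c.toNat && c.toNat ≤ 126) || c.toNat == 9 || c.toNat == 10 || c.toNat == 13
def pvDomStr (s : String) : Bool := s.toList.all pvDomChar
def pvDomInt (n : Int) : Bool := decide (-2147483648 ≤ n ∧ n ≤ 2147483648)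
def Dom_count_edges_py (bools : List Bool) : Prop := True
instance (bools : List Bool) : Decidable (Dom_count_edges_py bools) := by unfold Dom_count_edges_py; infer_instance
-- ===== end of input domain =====

-- B replaces A's stateful prev-flag loop by the arithmetic identity
-- edges = #trues - #(adjacent True,True pairs); objective: alternative.

-- ===== PORT A =====
-- for v in bools: if v and not prev: c += 1; prev = v  — state (prev, c)
def count_edges_py (bools : List Bool) : Int :=
  (bools.foldl (fun (s : Bool × Int) v =>
    (v, if v && !s.1 then s.2 + 1 else s.2)) (false, 0)).2

-- ===== PORT B =====
-- sum(bs) - sum(1 for a,b in zip(bs, bs[1:]) if a and b)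
def count_edges_py_alt (bools : List Bool) : Int :=
  ((bools.filter (fun b => b)).length : Int)
    - (((bools.zip (bools.drop 1)).filter (fun p => p.1 && p.2)).length : Int)

-- ===== PRECONDITION & SPEC =====
def Spec_count_edges_py (bools : List Bool) (out : Int) : Prop := out = count_edges_py_alt bools
instance (bools : List Bool) (out : Int) : Decidable (Spec_count_edges_py bools out) := by unfold Spec_count_edges_py; infer_instance

-- ===== CLAIM (what is proved, stated in full; the proofs are below) =====
def Claim_equal_count_edges_py : Prop := ∀ (bools : List Bool), Dom_count_edges_py bools → Spec_count_edges_py bools (count_edges_py bools)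

-- ===== LEMMAS AND PROOFS =====

-- #(adjacent TT pairs) in (prev :: l)
def pvPairs (l : List Bool) : Int :=
  (((l.zip (l.drop 1)).filter (fun p => p.1 && p.2)).length : Int)

theorem pvPairs_cons (prev v : Bool) (t : List Bool) :
    pvPairs (prev :: v :: t) = (if prev && v then 1 else 0) + pvPairs (v :: t) := by
  cases prev <;> cases v <;> simp [pvPairs] <;> ring

-- A's loop from an arbitrary state (prev, c)
theorem pv_foldA_eq (l : List Bool) : ∀ (prev : Bool) (c : Int),
    (l.foldl (fun (s : Bool × Int) v =>
      (v, if v && !s.1 then s.2 + 1 else s.2)) (prev, c)).2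
    = c + ((l.filter (fun b => b)).length : Int) - pvPairs (prev :: l) := by
  induction l with
  | nil => intro prev c; simp [pvPairs]
  | cons v t ih =>
    intro prev c
    simp only [List.foldl_cons]
    rw [ih, pvPairs_cons]
    cases prev <;> cases v <;> simp <;> ring

-- ===== VERDICT (by name: the statement is the Claim_ definition above) =====
theorem count_edges_py_spec : Claim_equal_count_edges_py := by
  intro bools _
  unfold Spec_count_edges_py count_edges_py count_edges_py_alt
  rw [pv_foldA_eq]
  cases bools with
  | nil => simp [pvPairs]
  | cons v t => cases v <;> simp [pvPairs]
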